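-- pv_equiv track=rewrite | github.com/liut0223/tyllm-docs | build_qw3_vl_4b.py | list_to_str_without_tail_zeros
-- ===== SOURCE A (Python) =====
-- def list_to_str_without_tail_zeros(lst):
--     last_non_zero_idx = -1
--     for i in range(len(lst)-1, -1, -1):
--         if lst[i] != 0:
--             last_non_zero_idx = i
--             break
--     if last_non_zero_idx == -1:
--         return ""
--     return "".join(str(num) for num in lst[:last_non_zero_idx+1])
-- ===== SOURCE B (Python) =====
-- def list_to_str_without_tail_zeros(lst):
--     result = []
--     pending = []
--     for num in lst:
--         if num != 0:
--             result.extend(pending)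
--             pending = []
--             result.append(str(num))
--         else:
--             pending.append(str(num))
--     return "".join(result)
-- ===== Notes on version B (the rewrite author's own statement) =====
-- stated objective: alternative
-- what changed: Replaces the backward index scan for the last nonzero plus a slice-and-join with a single forward pass that buffers stringified zeros in a pending list and flushes it only when a later nonzero appears, so trailing zeros are never emitted.
import Mathlib
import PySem

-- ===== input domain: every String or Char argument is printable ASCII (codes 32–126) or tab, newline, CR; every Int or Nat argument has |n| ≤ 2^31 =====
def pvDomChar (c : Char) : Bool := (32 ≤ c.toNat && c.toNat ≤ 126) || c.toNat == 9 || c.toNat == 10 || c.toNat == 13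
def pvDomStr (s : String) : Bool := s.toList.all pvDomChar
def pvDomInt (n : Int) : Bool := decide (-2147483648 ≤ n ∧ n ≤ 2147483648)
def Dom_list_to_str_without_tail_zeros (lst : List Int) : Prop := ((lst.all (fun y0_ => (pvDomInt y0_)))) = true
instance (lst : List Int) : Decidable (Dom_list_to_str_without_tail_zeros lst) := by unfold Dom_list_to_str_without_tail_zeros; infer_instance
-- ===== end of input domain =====

-- B replaces A's backward scan for the last nonzero index (then slice-and-join) with a
-- single forward pass buffering stringified zeros in a pending list ('alternative').

-- ===== PORT A =====
-- the 'for i in range(len(lst)-1, -1, -1): if lst[i] != 0: last = i; break' loop;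
-- every i drawn from the range is a valid index of lst, so pyGetD's default 0 is never used
def pvSearchA (lst : List Int) : List Int → Int
  | [] => -1
  | i :: rest =>
    if PySem.List.pyGetD lst i 0 ≠ 0 then i else pvSearchA lst rest

def list_to_str_without_tail_zeros (lst : List Int) : String :=
  let last_non_zero_idx := pvSearchA lst (PySem.List.pyRange ((lst.length : Int) - 1) (-1) (-1))
  if last_non_zero_idx = -1 then ""
  else PySem.Str.join "" ((PySem.List.slice lst none (some (last_non_zero_idx + 1))).map PySem.Int.toStr)

-- ===== PORT B =====
-- state = (result, pending)
def pvStepB (st : List String × List String) (num : Int) : List String × List String :=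
  if num ≠ 0 then (st.1 ++ st.2 ++ [PySem.Int.toStr num], [])
  else (st.1, st.2 ++ [PySem.Int.toStr num])

def list_to_str_without_tail_zeros_alt (lst : List Int) : String :=
  let st := lst.foldl pvStepB ([], [])
  PySem.Str.join "" st.1

-- ===== PRECONDITION & SPEC =====
def Spec_list_to_str_without_tail_zeros (lst : List Int) (out : String) : Prop := out = list_to_str_without_tail_zeros_alt lst
instance (lst : List Int) (out : String) : Decidable (Spec_list_to_str_without_tail_zeros lst out) := by unfold Spec_list_to_str_without_tail_zeros; infer_instance

-- ===== CLAIM (what is proved, stated in full; the proofs are below) =====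
def Claim_equal_list_to_str_without_tail_zeros : Prop := ∀ (lst : List Int), Dom_list_to_str_without_tail_zeros lst → Spec_list_to_str_without_tail_zeros lst (list_to_str_without_tail_zeros lst)

-- ===== LEMMAS AND PROOFS =====

-- B's fold invariant: result ++ pending = map toStr of everything processed so far
theorem pvStepB_inv (l : List Int) (res pen : List String) :
    (l.foldl pvStepB (res, pen)).1 ++ (l.foldl pvStepB (res, pen)).2
      = res ++ pen ++ l.map PySem.Int.toStr := by
  induction l generalizing res pen with
  | nil => simp
  | cons x xs ih =>
    by_cases hx : x = 0 <;> simp [pvStepB, hx, ih, List.append_assoc]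

-- the backward search ignores an appended element when all probed indices hit the prefix
theorem pvSearchA_append (l : List Int) (z : Int) (r : List Int)
    (h : ∀ i ∈ r, 0 ≤ i ∧ i < (l.length : Int)) :
    pvSearchA (l ++ [z]) r = pvSearchA l r := by
  induction r with
  | nil => rfl
  | cons i rest ih =>
    have hi := h i (by simp)
    have hlen : i < ((l ++ [z]).length : Int) := by
      rw [List.length_append]; push_cast; omega
    have hget : PySem.List.pyGetD (l ++ [z]) i 0 = PySem.List.pyGetD l i 0 := by
      have h1 : i.toNat < l.length := by omega
      rw [PySem.List.pyGetD_eq_getElem (l ++ [z]) 0 hi.1 hlen,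
          PySem.List.pyGetD_eq_getElem l 0 hi.1 (by omega)]
      simp [h1]
    simp only [pvSearchA, hget]
    split
    · rfl
    · exact ih (fun j hj => h j (by simp [hj]))

-- the search returns -1 or a member of the index list
theorem pvSearchA_mem (lst : List Int) (r : List Int) :
    pvSearchA lst r = -1 ∨ pvSearchA lst r ∈ r := by
  induction r with
  | nil => exact Or.inl rfl
  | cons i rest ih =>
    simp only [pvSearchA]
    split
    · exact Or.inr (by simp)
    · rcases ih with h | h
      · exact Or.inl h
      · exact Or.inr (by simp [h])

theorem list_to_str_eq (lst : List Int) :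
    list_to_str_without_tail_zeros lst = list_to_str_without_tail_zeros_alt lst := by
  induction lst using List.reverseRecOn with
  | nil => decide
  | append_singleton l x ih =>
    have hlen : (((l ++ [x]).length : Int)) - 1 = (l.length : Int) := by
      rw [List.length_append, List.length_singleton]; push_cast; omega
    have hcons : PySem.List.pyRange ((l.length : Int)) (-1) (-1)
        = (l.length : Int) :: PySem.List.pyRange ((l.length : Int) - 1) (-1) (-1) :=
      PySem.List.pyRange_neg_one_cons (a := (l.length : Int)) (b := -1) (by omega)
    have hgetx : PySem.List.pyGetD (l ++ [x]) (l.length : Int) 0 = x := by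
      rw [PySem.List.pyGetD_eq_getElem (l ++ [x]) (i := (l.length : Int)) 0 (by omega)
            (by rw [List.length_append, List.length_singleton]; push_cast; omega)]
      simp
    by_cases hx : x = 0
    · -- appended zero: both sides equal their value on l
      subst hx
      have hmem : ∀ i ∈ PySem.List.pyRange ((l.length : Int) - 1) (-1) (-1),
          0 ≤ i ∧ i < (l.length : Int) := by
        intro i hi
        rw [PySem.List.mem_pyRange_neg_one] at hi
        omega
      have hsearch : pvSearchA (l ++ [(0 : Int)])
            (PySem.List.pyRange (((l ++ [(0 : Int)]).length : Int) - 1) (-1) (-1))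
          = pvSearchA l (PySem.List.pyRange ((l.length : Int) - 1) (-1) (-1)) := by
        rw [hlen, hcons]
        simp only [pvSearchA, hgetx]
        norm_num
        exact pvSearchA_append l 0 _ hmem
      have hbound : ∀ s, pvSearchA l (PySem.List.pyRange ((l.length : Int) - 1) (-1) (-1)) = s →
          s ≠ -1 → 0 ≤ s ∧ s < (l.length : Int) := by
        intro s hseq hne
        rcases pvSearchA_mem l (PySem.List.pyRange ((l.length : Int) - 1) (-1) (-1)) with h | h
        · exact absurd (hseq ▸ h) hne
        · exact hmem s (hseq ▸ h)
      have hAeq : list_to_str_without_tail_zeros (l ++ [(0 : Int)])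
          = list_to_str_without_tail_zeros l := by
        simp only [list_to_str_without_tail_zeros]
        rw [hsearch]
        by_cases hneg : pvSearchA l (PySem.List.pyRange ((l.length : Int) - 1) (-1) (-1)) = -1
        · rw [if_pos hneg, if_pos hneg]
        · rw [if_neg hneg, if_neg hneg]
          have hsb := hbound _ rfl hneg
          congr 1
          rw [PySem.List.slice_to _ (by omega), PySem.List.slice_to _ (by omega),
              List.take_append_of_le_length (by omega)]
      have hBeq : list_to_str_without_tail_zeros_alt (l ++ [(0 : Int)])
          = list_to_str_without_tail_zeros_alt l := by
        simp only [list_to_str_without_tail_zeros_alt]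
        rw [List.foldl_append]
        simp [pvStepB]
      rw [hAeq, hBeq]
      exact ih
    · -- appended nonzero: both sides are the join of the whole mapped list
      have hA : list_to_str_without_tail_zeros (l ++ [x])
          = PySem.Str.join "" ((l ++ [x]).map PySem.Int.toStr) := by
        have hsearchx : pvSearchA (l ++ [x])
            ((l.length : Int) :: PySem.List.pyRange ((l.length : Int) - 1) (-1) (-1))
            = (l.length : Int) := by
          simp only [pvSearchA, hgetx]
          simp [hx]
        simp only [list_to_str_without_tail_zeros]
        rw [hlen, hcons, hsearchx,
            if_neg (show ¬((l.length : Int) = -1) by omega)]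
        congr 1
        rw [PySem.List.slice_to _ (by omega)]
        rw [show ((l.length : Int) + 1).toNat = (l ++ [x]).length by
          rw [List.length_append, List.length_singleton]; omega]
        simp
      have h1 := pvStepB_inv l [] []
      have hB : list_to_str_without_tail_zeros_alt (l ++ [x])
          = PySem.Str.join "" ((l ++ [x]).map PySem.Int.toStr) := by
        have hstep : (pvStepB (List.foldl pvStepB ([], []) l) x).1
            = (List.foldl pvStepB ([], []) l).1 ++ (List.foldl pvStepB ([], []) l).2
              ++ [PySem.Int.toStr x] := by
          simp [pvStepB, hx]
        simp only [list_to_str_without_tail_zeros_alt]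
        rw [List.foldl_append]
        simp only [List.foldl_cons, List.foldl_nil]
        simp only [List.nil_append] at h1
        rw [hstep, h1]
        simp
      rw [hA, hB]

-- ===== VERDICT (by name: the statement is the Claim_ definition above) =====
theorem list_to_str_without_tail_zeros_spec : Claim_equal_list_to_str_without_tail_zeros := by
  intro lst _
  exact list_to_str_eq lst
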